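-- pv_equiv track=rewrite | github.com/abdel792/forPython | forPython/__init__.py | isStringBalanced
-- ===== SOURCE A (Python) =====
-- def isStringBalanced(s):
-- 	# vérification de l'équilibre des guillemets et appostrophes
-- 	# on en profitera pour faire certains repérages
-- 	flag = False
-- 	char = ""
-- 	prev = ""
-- 	stringList = []
-- 	d = - 1
-- 	f = - 1
-- 	commentStart = - 1
-- 	litteral = False
-- 	i = - 1
-- 	for e in s:
-- 		i = i + 1
-- 		if flag == False:
-- 			if e == "#": # caractère dièze
-- 				commentStart = i
-- 				break
-- 			elif e == '"': # caractère guillemet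
-- 				char = '"'
-- 				d = i
-- 				flag = True
-- 				if s[i - 1] == "r": litteral = True
-- 				else: litteral = False
-- 			elif e == "'": # caractère appostrophe
-- 				char = "'"
-- 				d = i
-- 				flag = True
-- 				if s[i - 1]: litteral = True
-- 				else: litteral = False
-- 			# end if
-- 		else: # flag==True
-- 			if e == char:
-- 				if prev == "\\" and litteral == True:
-- 					prev = e
-- 					continue
-- 				elif prev == "\\" and litteral == False:
-- 					k = i - 1
-- 					s3 = ""
-- 					while(k >= 0):
-- 						if s[k] == "\\": s3 = s3 + "\\"
-- 						k = k - 1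
-- 					# end while
-- 					# le nombre d'antislash doit être impaire
-- 					if len(s3) % 2 != 0:
-- 						prev = e
-- 						continue
-- 					# end if
-- 				# end if
-- 				f = i
-- 				stringList.append((d, f))
-- 				flag = False # fermeture du guillemet
-- 			# end if
-- 		# end if
-- 		prev = e
-- 	# end for
-- 	# renvoi  du tuple constitué de:
-- 	#  vrai si  les strings sont équilibrés
-- 	# et la liste des positions de strings trouvés
-- 	return not flag, stringList
-- ===== SOURCE B (Python) =====
-- def isStringBalanced(s):
--     # Single pass keeping a running count of backslashes seen so far,
--     # so no backward rescan is needed at a candidate closing quote.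
--     stringList = []
--     open_at = -1          # -1 = not inside a string; else index of opening quote
--     char = ''
--     litteral = False
--     nbs = 0               # number of backslashes among s[:i]
--     prev = ''
--     for i, e in enumerate(s):
--         if open_at < 0:
--             if e == '#':
--                 break
--             if e == '"' or e == "'":
--                 open_at = i
--                 char = e
--                 litteral = True if e == "'" else (s[i - 1] == 'r')
--         else:
--             if e == char and not (prev == '\\' and (litteral or nbs % 2 == 1)):
--                 stringList.append((open_at, i))
--                 open_at = -1
--         prev = e
--         if e == '\\':
--             nbs += 1
--     return open_at < 0, stringList
-- ===== Notes on version B (the rewrite author's own statement) =====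
-- stated objective: alternative
-- what changed: B maintains a running count of backslashes seen so far in a single pass instead of A's backward rescan of the whole prefix at every backslash-preceded closing quote, and folds A's nested escape branches into one closing condition.
import Mathlib
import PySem

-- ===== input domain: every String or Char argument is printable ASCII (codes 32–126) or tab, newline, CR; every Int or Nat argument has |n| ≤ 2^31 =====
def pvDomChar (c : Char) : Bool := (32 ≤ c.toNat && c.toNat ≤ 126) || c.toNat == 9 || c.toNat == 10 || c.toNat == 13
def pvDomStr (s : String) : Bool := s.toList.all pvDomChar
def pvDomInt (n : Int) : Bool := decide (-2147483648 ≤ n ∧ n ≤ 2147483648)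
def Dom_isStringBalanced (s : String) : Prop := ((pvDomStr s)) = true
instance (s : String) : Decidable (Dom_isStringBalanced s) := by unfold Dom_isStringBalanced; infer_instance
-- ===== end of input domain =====

-- B replaces A's backward rescan for backslashes at every candidate closing quote by a
-- running count maintained in one pass, and folds A's nested escape branches into a
-- single closing condition (objective: alternative).

-- ===== PORT A =====
-- Python's inner `while(k >= 0): if s[k] == "\\": s3 = s3 + "\\"; k = k - 1`
def pvAWhile (s : List Char) (k : Int) (s3 : List Char) : List Char :=
  if 0 ≤ k then
    pvAWhile s (k - 1) (if PySem.List.pyGet? s k = some '\\' then s3 ++ ['\\'] else s3)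
  else s3
termination_by (k + 1).toNat
decreasing_by omega

-- the for-loop of A; `char`/`prev` start as "" (ported as `none`); `break` returns the
-- final tuple directly; state order: i0 flag char prev out d f commentStart litteral
def pvALoop (s : List Char) :
    List Char → Int → Bool → Option Char → Option Char → List (Int × Int) →
    Int → Int → Int → Bool → Bool × List (Int × Int)
  | [], _i0, flag, _char, _prev, out, _d, _f, _cs, _lit => (!flag, out)
  | e :: rest, i0, flag, char, prev, out, d, f, cs, lit =>
    let i := i0 + 1
    if flag = false then
      if e = '#' then (!flag, out)   -- commentStart := i; break
      else if e = '"' then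
        pvALoop s rest i true (some '"') (some e) out i f cs
          (decide (PySem.List.pyGet? s (i - 1) = some 'r'))
      else if e = '\'' then
        -- `if s[i - 1]:` — truthiness of the one-character string s[i-1]
        pvALoop s rest i true (some '\'') (some e) out i f cs
          (PySem.List.pyGet? s (i - 1)).isSome
      else pvALoop s rest i flag char (some e) out d f cs lit
    else
      if some e = char then
        if prev = some '\\' ∧ lit = true then
          pvALoop s rest i flag char (some e) out d f cs lit
        else if prev = some '\\' ∧ lit = false then
          let s3 := pvAWhile s (i - 1) []
          if s3.length % 2 ≠ 0 then
            pvALoop s rest i flag char (some e) out d f cs lit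
          else
            pvALoop s rest i false char (some e) (out ++ [(d, i)]) d i cs lit
        else
          pvALoop s rest i false char (some e) (out ++ [(d, i)]) d i cs lit
      else pvALoop s rest i flag char (some e) out d f cs lit

def isStringBalanced (s : String) : Bool × (List (Int × Int)) :=
  pvALoop s.toList s.toList (-1) false none none [] (-1) (-1) (-1) false

-- ===== PORT B =====
-- one pass; state order: i openAt char litteral nbs prev out
def pvBLoop (s : List Char) :
    List Char → Int → Int → Option Char → Bool → Int → Option Char → List (Int × Int) →
    Bool × (List (Int × Int))
  | [], _i, openAt, _char, _lit, _nbs, _prev, out => (decide (openAt < 0), out)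
  | e :: rest, i, openAt, char, lit, nbs, prev, out =>
    let nbs' := nbs + (if e = '\\' then 1 else 0)
    if openAt < 0 then
      if e = '#' then (decide (openAt < 0), out)
      else if e = '"' ∨ e = '\'' then
        pvBLoop s rest (i + 1) i (some e)
          (if e = '\'' then true else decide (PySem.List.pyGet? s (i - 1) = some 'r'))
          nbs' (some e) out
      else pvBLoop s rest (i + 1) openAt char lit nbs' (some e) out
    else
      if some e = char ∧ ¬ (prev = some '\\' ∧ (lit = true ∨ PySem.Int.mod nbs 2 = 1)) then
        pvBLoop s rest (i + 1) (-1) char lit nbs' (some e) (out ++ [(openAt, i)])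
      else pvBLoop s rest (i + 1) openAt char lit nbs' (some e) out

def isStringBalanced_alt (s : String) : Bool × (List (Int × Int)) :=
  pvBLoop s.toList s.toList 0 (-1) none false 0 none []

-- ===== PRECONDITION & SPEC =====
def Spec_isStringBalanced (s : String) (out : Bool × (List (Int × Int))) : Prop := out = isStringBalanced_alt s
instance (s : String) (out : Bool × (List (Int × Int))) : Decidable (Spec_isStringBalanced s out) := by unfold Spec_isStringBalanced; infer_instance

-- ===== CLAIM (what is proved, stated in full; the proofs are below) =====
def Claim_equal_isStringBalanced : Prop := ∀ (s : String), Dom_isStringBalanced s → Spec_isStringBalanced s (isStringBalanced s)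

-- ===== LEMMAS AND PROOFS =====

-- A's backward scan counts ALL backslashes in s[:k+1]
lemma pvAWhile_length (s : List Char) : ∀ (k : Nat) (s3 : List Char),
    (pvAWhile s ((k : Int) - 1) s3).length = (s.take k).count '\\' + s3.length := by
  intro k
  induction k with
  | zero => intro s3; rw [pvAWhile]; simp
  | succ n ih =>
    intro s3
    rw [pvAWhile]
    have h0 : (0 : Int) ≤ (n + 1 : Nat) - 1 := by push_cast; omega
    rw [if_pos h0]
    have hc : ((n + 1 : Nat) : Int) - 1 - 1 = (n : Int) - 1 := by push_cast; ring
    have hg : ((n + 1 : Nat) : Int) - 1 = ((n : Nat) : Int) := by push_cast; ring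
    rw [hc, hg, ih]
    rw [PySem.List.pyGet?_natCast]
    by_cases hn : n < s.length
    · rw [List.take_add_one, List.getElem?_eq_getElem hn]
      simp only [Option.toList_some, List.count_append, List.count_singleton]
      by_cases hb : s[n] = '\\' <;> simp [hb] <;> omega
    · have h1 : s.take (n + 1) = s.take n := by
        rw [List.take_of_length_le (by omega), List.take_of_length_le (by omega)]
      have h2 : s[n]? = none := by simp; omega
      simp [h1, h2]

lemma count_take_succ (s : List Char) (i : Nat) (e : Char) (rest : List Char)
    (h : s.drop i = e :: rest) :
    (s.take (i + 1)).count '\\' = (s.take i).count '\\' + (if e = '\\' then 1 else 0) := by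
  have hi : i < s.length := by
    by_contra hc
    rw [List.drop_of_length_le (by omega)] at h
    simp at h
  have hd := List.drop_eq_getElem_cons hi
  rw [h] at hd
  have he : s[i] = e := (List.cons.injEq _ _ _ _ ▸ hd).1.symm
  rw [List.take_add_one, List.getElem?_eq_getElem hi]
  simp only [Option.toList_some, List.count_append, List.count_singleton, he]
  by_cases hb : e = '\\' <;> simp [hb]

-- s[i-1] exists (as a one-character string, hence truthy) whenever index i is in range
lemma pyGet_pred_isSome (s : List Char) (i : Nat) (e : Char) (rest : List Char)
    (h : s.drop i = e :: rest) :
    (PySem.List.pyGet? s ((i : Int) - 1)).isSome = true := by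
  have hi : i < s.length := by
    by_contra hc
    rw [List.drop_of_length_le (by omega)] at h
    simp at h
  cases i with
  | zero =>
    have hs : s ≠ [] := by intro hn; rw [hn] at hi; simp at hi
    rw [show ((0 : Nat) : Int) - 1 = -1 by norm_num, PySem.List.pyGet?_neg_one]
    exact List.getLast?_isSome.mpr hs
  | succ n =>
    have : ((n + 1 : Nat) : Int) - 1 = ((n : Nat) : Int) := by push_cast; ring
    rw [this, PySem.List.pyGet?_natCast]
    simp [List.getElem?_eq_getElem (show n < s.length by omega)]

-- equivalence of A's loop and B's loop under the state correspondence
lemma loop_eq (s : List Char) : ∀ (rest : List Char) (i : Nat) (flag : Bool)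
    (char prev : Option Char) (out : List (Int × Int)) (d f cs openAt : Int) (lit : Bool),
    s.drop i = rest →
    (flag = true → 0 ≤ openAt ∧ d = openAt) →
    (flag = false → openAt < 0) →
    pvALoop s rest ((i : Int) - 1) flag char prev out d f cs lit =
      pvBLoop s rest i openAt char lit ((s.take i).count '\\' : Int) prev out := by
  intro rest
  induction rest with
  | nil =>
    intro i flag char prev out d f cs openAt lit _ hf hnf
    cases flag with
    | false => simp [pvALoop, pvBLoop, hnf rfl]
    | true =>
      have h0 := (hf rfl).1
      simp [pvALoop, pvBLoop, show ¬ openAt < 0 by omega]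
  | cons e rest ih =>
    intro i flag char prev out d f cs openAt lit h hf hnf
    have h1 : s.drop (i + 1) = rest := by
      have := congrArg List.tail h
      simpa using this
    have hcnt : ((s.take (i + 1)).count '\\' : Int) =
        ((s.take i).count '\\' : Int) + (if e = '\\' then 1 else 0) := by
      rw [count_take_succ s i e rest h]; push_cast; split_ifs <;> simp
    have hi1 : ((i : Int) - 1) + 1 = (i : Int) := by ring
    have hip : (((i + 1 : Nat)) : Int) = (i : Int) + 1 := by push_cast; ring
    have hIA : (((i + 1 : Nat)) : Int) - 1 = (i : Int) := by push_cast; ring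
    rw [pvALoop, pvBLoop]
    simp only [hi1]
    cases flag with
    | false =>
      have hop := hnf rfl
      by_cases he : e = '#'
      · subst he; simp [hop]
      · by_cases hq : e = '"'
        · subst hq
          have IH := ih (i + 1) true (some '"') (some '"') out (i : Int) f cs (i : Int)
              (decide (PySem.List.pyGet? s ((i : Int) - 1) = some 'r')) h1
              (fun _ => ⟨Int.natCast_nonneg i, rfl⟩) (fun hc => by simp at hc)
          rw [hIA, hip, hcnt] at IH
          simp [hop, IH]
        · by_cases ha : e = '\''
          · subst ha
            have hsome := pyGet_pred_isSome s i '\'' rest h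
            have IH := ih (i + 1) true (some '\'') (some '\'') out (i : Int) f cs (i : Int)
                true h1 (fun _ => ⟨Int.natCast_nonneg i, rfl⟩) (fun hc => by simp at hc)
            rw [hIA, hip, hcnt] at IH
            simp [hop, hq, hsome, IH]
          · have IH := ih (i + 1) false char (some e) out d f cs openAt lit h1
                (fun hc => by simp at hc) (fun _ => hop)
            rw [hIA, hip, hcnt] at IH
            simp [hop, he, hq, ha, IH]
    | true =>
      obtain ⟨hop0, hdo⟩ := hf rfl
      have hO : ¬ openAt < 0 := by omega
      by_cases hc : some e = char
      · by_cases hp : prev = some '\\'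
        · cases lit with
          | true =>
            have IH := ih (i + 1) true char (some e) out d f cs openAt true h1
                (fun _ => ⟨hop0, hdo⟩) (fun hc => by simp at hc)
            rw [hIA, hip, hcnt, hc] at IH
            simp [hO, hc, hp, IH]
          | false =>
            have hlen := pvAWhile_length s i []
            by_cases hodd : (s.take i).count '\\' % 2 = 1
            · have IH := ih (i + 1) true char (some e) out d f cs openAt false h1
                  (fun _ => ⟨hop0, hdo⟩) (fun hc => by simp at hc)
              rw [hIA, hip, hcnt, hc] at IH
              have hA : (pvAWhile s ((i : Int) - 1) []).length % 2 ≠ 0 := by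
                rw [hlen]; simp only [List.length_nil, Nat.add_zero]; omega
              have hnd : ¬ (2 : Int) ∣ (((s.take i).count '\\' : Nat) : Int) := by omega
              simp [hO, hc, hp, hA, hnd, IH]
            · have IH := ih (i + 1) false char (some e) (out ++ [(d, (i : Int))]) d
                  (i : Int) cs (-1) false h1 (fun hc => by simp at hc) (fun _ => by omega)
              rw [hIA, hip, hcnt, hc] at IH
              have hA : ¬ (pvAWhile s ((i : Int) - 1) []).length % 2 ≠ 0 := by
                rw [hlen]; simp only [List.length_nil, Nat.add_zero]; omega
              have hd2 : (2 : Int) ∣ (((s.take i).count '\\' : Nat) : Int) := by omega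
              rw [hdo] at IH
              simp [hO, hc, hp, hA, hd2, hdo, IH]
        · have IH := ih (i + 1) false char (some e) (out ++ [(d, (i : Int))]) d
              (i : Int) cs (-1) lit h1 (fun hc => by simp at hc) (fun _ => by omega)
          rw [hIA, hip, hcnt, hc, hdo] at IH
          simp [hO, hc, hp, hdo, IH]
      · have IH := ih (i + 1) true char (some e) out d f cs openAt lit h1
            (fun _ => ⟨hop0, hdo⟩) (fun hc => by simp at hc)
        rw [hIA, hip, hcnt] at IH
        simp [hO, hc, IH]

-- ===== VERDICT (by name: the statement is the Claim_ definition above) =====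
theorem isStringBalanced_spec : Claim_equal_isStringBalanced := by
  intro s _
  unfold Spec_isStringBalanced isStringBalanced isStringBalanced_alt
  have := loop_eq s.toList s.toList 0 false none none [] (-1) (-1) (-1) (-1) false
    (by simp) (by simp) (by intro _; norm_num)
  simpa using this
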